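-- pv_equiv track=rewrite | github.com/qrzn/scripts | symbolic_drift_logger/symbolic_drift_logger_v3.py | detect_collapse_spiral
-- ===== SOURCE A (Python) =====
-- def detect_collapse_spiral(session_data):
--     collapse_spike = 0
--     spiral_threshold = 3
--     window = 5
--
--     for i in range(len(session_data) - window + 1):
--         window_events = [entry["Event"] for entry in session_data[i:i+window]]
--         collapse_count = sum(1 for event in window_events if event in ["Collapse", "Burnout", "Entropy Spike"])
--         if collapse_count >= spiral_threshold:
--             return True
--     return False
-- ===== SOURCE B (Python) =====
-- _COLLAPSE = {"Collapse", "Burnout", "Entropy Spike"}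
--
-- def detect_collapse_spiral(session_data):
--     if len(session_data) < 5:
--         return False
--     count = 0
--     window = []
--     for entry in session_data:
--         flag = entry["Event"] in _COLLAPSE
--         window.append(flag)
--         if flag:
--             count += 1
--         if len(window) > 5:
--             if window.pop(0):
--                 count -= 1
--         if len(window) == 5 and count >= 3:
--             return True
--     return False
-- ===== Notes on version B (the rewrite author's own statement) =====
-- stated objective: alternative
-- what changed: A rebuilds every 5-entry window by slicing and recounts collapse events per window; B makes one pass that maintains a sliding window of flags and an incremental collapse count, checking each full window without re-scanning it.
import Mathlib
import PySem

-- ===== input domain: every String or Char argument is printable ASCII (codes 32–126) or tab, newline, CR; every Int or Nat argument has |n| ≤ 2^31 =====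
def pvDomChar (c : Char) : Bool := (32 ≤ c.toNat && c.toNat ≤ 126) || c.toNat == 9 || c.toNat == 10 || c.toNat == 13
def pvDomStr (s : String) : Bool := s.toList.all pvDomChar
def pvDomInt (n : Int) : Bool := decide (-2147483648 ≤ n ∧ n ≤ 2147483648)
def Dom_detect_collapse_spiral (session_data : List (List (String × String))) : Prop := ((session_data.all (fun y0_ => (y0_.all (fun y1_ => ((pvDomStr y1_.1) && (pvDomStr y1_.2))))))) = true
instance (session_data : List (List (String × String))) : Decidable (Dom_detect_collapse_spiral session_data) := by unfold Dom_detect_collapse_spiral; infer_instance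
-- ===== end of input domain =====

-- B replaces A's per-window recount over slices by one pass that maintains a sliding window and an
-- incremental collapse count (objective: alternative decomposition, same O(n) window count but no re-scan per window).

-- ===== PORT A =====
-- entry["Event"]: raises KeyError when absent; the default "" is only reached outside Pre_.
def dcsEvent (entry : List (String × String)) : String :=
  ((PySem.Dict.mk entry).get? "Event").getD ""

def dcsCollapseEvents : List String := ["Collapse", "Burnout", "Entropy Spike"]

def dcsLoopA (s : List (List (String × String))) : List Int → Bool
  | [] => false
  | i :: rest =>
    let window_events := (PySem.List.slice s (some i) (some (i + 5))).map dcsEvent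
    let collapse_count := (window_events.filter (fun e => dcsCollapseEvents.contains e)).length
    if 3 ≤ collapse_count then true else dcsLoopA s rest

def detect_collapse_spiral (session_data : List (List (String × String))) : Bool :=
  dcsLoopA session_data (PySem.List.pyRange 0 (PySem.List.len session_data - 5 + 1) 1)

-- ===== PORT B =====
def dcsCollapseSet : PySem.Set String := PySem.Set.ofList ["Collapse", "Burnout", "Entropy Spike"]

def dcsLoopB : List (List (String × String)) → List Bool → Int → Bool
  | [], _, _ => false
  | entry :: rest, window, count =>
    let flag := dcsCollapseSet.contains (dcsEvent entry)
    let window1 := window ++ [flag]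
    let count1 := if flag then count + 1 else count
    let window2 := if 5 < window1.length then window1.tail else window1
    let count2 := if 5 < window1.length then (if window1.headD false then count1 - 1 else count1) else count1
    if window2.length = 5 ∧ 3 ≤ count2 then true else dcsLoopB rest window2 count2

def detect_collapse_spiral_alt (session_data : List (List (String × String))) : Bool :=
  if session_data.length < 5 then false else dcsLoopB session_data [] 0

-- ===== PRECONDITION & SPEC =====
-- Pre_ excludes sessions of length ≥ 5 containing an entry without an "Event" key: on those the Python A
-- either raises KeyError or (when a spiral triggers before any window reaches the bad entry) returns True,
-- which B also returns there.
def Pre_detect_collapse_spiral (session_data : List (List (String × String))) : Prop :=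
  session_data.length < 5 ∨ ∀ entry ∈ session_data, ((PySem.Dict.mk entry).get? "Event").isSome = true

instance (session_data : List (List (String × String))) : Decidable (Pre_detect_collapse_spiral session_data) := by
  unfold Pre_detect_collapse_spiral; infer_instance

def pvWitness_detect_collapse_spiral : (List (List (String × String))) :=
  [[("Event", "Collapse")], [("Event", "Rest")], [("Event", "Calm")], [("Event", "Burnout")], [("Event", "Entropy Spike")]]

def Spec_detect_collapse_spiral (session_data : List (List (String × String))) (out : Bool) : Prop := out = detect_collapse_spiral_alt session_data
instance (session_data : List (List (String × String))) (out : Bool) : Decidable (Spec_detect_collapse_spiral session_data out) := by unfold Spec_detect_collapse_spiral; infer_instance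

-- ===== CLAIM (what is proved, stated in full; the proofs are below) =====
def Claim_equal_detect_collapse_spiral : Prop := ∀ (session_data : List (List (String × String))), Dom_detect_collapse_spiral session_data → Pre_detect_collapse_spiral session_data → Spec_detect_collapse_spiral session_data (detect_collapse_spiral session_data)

-- ===== LEMMAS AND PROOFS =====

-- The common flag: whether an entry's event is a collapse event.
def dcsFlag (entry : List (String × String)) : Bool :=
  dcsCollapseEvents.contains (dcsEvent entry)

-- Reference: scan the flag list by tails, checking each full window of 5.
def dcsRef (l : List Bool) : Bool :=
  if 5 ≤ l.length then
    (if 3 ≤ (l.take 5).countP id then true else dcsRef l.tail)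
  else false
termination_by l.length
decreasing_by simp [List.length_tail]; omega

lemma lemA (s : List (List (String × String))) :
    ∀ (m k : Nat), s.length ≤ k + m →
      dcsLoopA s (PySem.List.pyRange (k : Int) ((s.length : Int) - 4) 1) = dcsRef ((s.map dcsFlag).drop k) := by
  intro m
  induction m with
  | zero =>
    intro k hk
    rw [PySem.List.pyRange_one_eq_nil (by omega), dcsRef]
    simp [dcsLoopA]
    omega
  | succ m ih =>
    intro k hk
    by_cases hlt : (k : Int) < (s.length : Int) - 4
    · have hk5 : k + 5 ≤ s.length := by omega
      rw [PySem.List.pyRange_one_cons hlt]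
      have hsl : PySem.List.slice s (some (k:Int)) (some ((k:Int) + 5)) = (s.drop k).take 5 := by
        have h5 : ((k:Int) + 5) = ((k:Int) + ((5:Nat):Int)) := by norm_num
        rw [h5, PySem.List.slice_natCast_add]
      have hcnt : (((PySem.List.slice s (some (k:Int)) (some ((k:Int) + 5))).map dcsEvent).filter
            (fun e => dcsCollapseEvents.contains e)).length
          = (((s.map dcsFlag).drop k).take 5).countP id := by
        rw [hsl]
        simp [← List.countP_eq_length_filter, ← List.map_take, ← List.map_drop,
              List.countP_map, Function.comp_def]
        congr 1
        funext x
        simp [dcsFlag]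
      rw [dcsRef]
      have hlen : 5 ≤ ((s.map dcsFlag).drop k).length := by simp; omega
      rw [if_pos hlen]
      simp only [dcsLoopA, hcnt]
      by_cases hc : 3 ≤ (((s.map dcsFlag).drop k).take 5).countP id
      · simp [hc]
      · simp only [if_neg hc]
        have hcast : ((k:Int) + 1) = ((k + 1 : Nat) : Int) := by push_cast; ring
        rw [hcast, ih (k+1) (by omega), List.tail_drop]
    · rw [PySem.List.pyRange_one_eq_nil (by omega), dcsRef]
      simp [dcsLoopA]
      omega

lemma dcsSet_eq : dcsCollapseSet = dcsCollapseEvents := by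
  simp [dcsCollapseSet, dcsCollapseEvents, PySem.Set.ofList]

lemma dcsList5 {α : Type} (w : List α) (h : w.length = 5) : ∃ a b c d e, w = [a, b, c, d, e] := by
  rcases w with _|⟨a, _|⟨b, _|⟨c, _|⟨d, _|⟨e, _|⟨f, t⟩⟩⟩⟩⟩⟩ <;> simp_all

lemma dcsList4 {α : Type} (w : List α) (h : w.length = 4) : ∃ a b c d, w = [a, b, c, d] := by
  rcases w with _|⟨a, _|⟨b, _|⟨c, _|⟨d, _|⟨e, t⟩⟩⟩⟩⟩ <;> simp_all

def dcsC1 (f : Bool) (count : Int) : Int := if f then count + 1 else count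

def dcsC2 (a f : Bool) (count : Int) : Int :=
  if a then (if f then count + 1 else count) - 1 else (if f then count + 1 else count)

lemma dcsStep5 (e : List (String × String)) (rest : List (List (String × String)))
    (a b2 b3 b4 b5 : Bool) (count : Int) :
    dcsLoopB (e :: rest) [a, b2, b3, b4, b5] count =
      if 3 ≤ dcsC2 a (dcsFlag e) count then true
      else dcsLoopB rest [b2, b3, b4, b5, dcsFlag e] (dcsC2 a (dcsFlag e) count) := by
  have hflag : dcsCollapseSet.contains (dcsEvent e) = dcsFlag e := by rw [dcsSet_eq]; rfl
  show (if ([b2, b3, b4, b5, dcsCollapseSet.contains (dcsEvent e)] : List Bool).length = 5 ∧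
          3 ≤ dcsC2 a (dcsCollapseSet.contains (dcsEvent e)) count then true
        else dcsLoopB rest [b2, b3, b4, b5, dcsCollapseSet.contains (dcsEvent e)]
          (dcsC2 a (dcsCollapseSet.contains (dcsEvent e)) count)) = _
  rw [hflag]
  simp

lemma dcsStep4 (e : List (String × String)) (rest : List (List (String × String)))
    (a b c d : Bool) (count : Int) :
    dcsLoopB (e :: rest) [a, b, c, d] count =
      if 3 ≤ dcsC1 (dcsFlag e) count then true
      else dcsLoopB rest [a, b, c, d, dcsFlag e] (dcsC1 (dcsFlag e) count) := by
  have hflag : dcsCollapseSet.contains (dcsEvent e) = dcsFlag e := by rw [dcsSet_eq]; rfl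
  show (if ([a, b, c, d, dcsCollapseSet.contains (dcsEvent e)] : List Bool).length = 5 ∧
          3 ≤ dcsC1 (dcsCollapseSet.contains (dcsEvent e)) count then true
        else dcsLoopB rest [a, b, c, d, dcsCollapseSet.contains (dcsEvent e)]
          (dcsC1 (dcsCollapseSet.contains (dcsEvent e)) count)) = _
  rw [hflag]
  simp

lemma dcsLoopB_cons (e : List (String × String)) (rest : List (List (String × String)))
    (w : List Bool) (count : Int) :
    dcsLoopB (e :: rest) w count =
      (let flag := dcsCollapseSet.contains (dcsEvent e)
       let window1 := w ++ [flag]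
       let count1 := if flag then count + 1 else count
       let window2 := if 5 < window1.length then window1.tail else window1
       let count2 := if 5 < window1.length then (if window1.headD false then count1 - 1 else count1) else count1
       if window2.length = 5 ∧ 3 ≤ count2 then true else dcsLoopB rest window2 count2) := rfl

lemma lemBf :
    ∀ (rest : List (List (String × String))) (w : List Bool) (count : Int),
      w.length = 5 → count = (w.countP id : Int) →
      dcsLoopB rest w count = dcsRef (w.tail ++ rest.map dcsFlag) := by
  intro rest
  induction rest with
  | nil =>
    intro w count hw hc
    have hn : ¬ (5 ≤ (w.tail ++ ([] : List (List (String × String))).map dcsFlag).length) := by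
      simp [hw]
    rw [dcsRef, if_neg hn]
    simp [dcsLoopB]
  | cons e rest ih =>
    intro w count hw hc
    obtain ⟨a, b2, b3, b4, b5, rfl⟩ := dcsList5 w hw
    rw [dcsStep5]
    simp only [List.tail_cons, List.map_cons]
    rw [dcsRef]
    have hc2 : dcsC2 a (dcsFlag e) count = (List.countP id [b2, b3, b4, b5, dcsFlag e] : Int) := by
      subst hc
      simp only [dcsC2, List.countP_cons, List.countP_nil]
      cases a <;> cases hfe : dcsFlag e <;> cases b2 <;> cases b3 <;> cases b4 <;> cases b5 <;>
        simp_all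
    have hlen : 5 ≤ ([b2, b3, b4, b5] ++ dcsFlag e :: rest.map dcsFlag).length := by
      simp
    have htake : ([b2, b3, b4, b5] ++ dcsFlag e :: rest.map dcsFlag).take 5
        = [b2, b3, b4, b5, dcsFlag e] := rfl
    have htail : ([b2, b3, b4, b5] ++ dcsFlag e :: rest.map dcsFlag).tail
        = [b3, b4, b5] ++ dcsFlag e :: rest.map dcsFlag := rfl
    rw [if_pos hlen, htake, htail, hc2]
    by_cases hcond : 3 ≤ List.countP id [b2, b3, b4, b5, dcsFlag e]
    · rw [if_pos (by exact_mod_cast hcond), if_pos hcond]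
    · rw [if_neg (by exact_mod_cast hcond), if_neg hcond]
      rw [ih [b2, b3, b4, b5, dcsFlag e] _ rfl rfl]
      simp

lemma lemBb :
    ∀ (rest : List (List (String × String))) (w : List Bool) (count : Int),
      w.length < 5 → count = (w.countP id : Int) →
      dcsLoopB rest w count = dcsRef (w ++ rest.map dcsFlag) := by
  intro rest
  induction rest with
  | nil =>
    intro w count hw hc
    have hn : ¬ (5 ≤ (w ++ ([] : List (List (String × String))).map dcsFlag).length) := by
      simp; omega
    rw [dcsRef, if_neg hn]
    simp [dcsLoopB]
  | cons e rest ih =>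
    intro w count hw hc
    by_cases h4 : w.length = 4
    · obtain ⟨a, b, c, d, rfl⟩ := dcsList4 w h4
      rw [dcsStep4]
      simp only [List.map_cons]
      rw [dcsRef]
      have hc1 : dcsC1 (dcsFlag e) count = (List.countP id [a, b, c, d, dcsFlag e] : Int) := by
        subst hc
        simp only [dcsC1, List.countP_cons, List.countP_nil]
        cases hfe : dcsFlag e <;> cases a <;> cases b <;> cases c <;> cases d <;>
          simp_all
      have hlen : 5 ≤ ([a, b, c, d] ++ dcsFlag e :: rest.map dcsFlag).length := by
        simp
      have htake : ([a, b, c, d] ++ dcsFlag e :: rest.map dcsFlag).take 5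
          = [a, b, c, d, dcsFlag e] := rfl
      have htail : ([a, b, c, d] ++ dcsFlag e :: rest.map dcsFlag).tail
          = [b, c, d] ++ dcsFlag e :: rest.map dcsFlag := rfl
      rw [if_pos hlen, htake, htail, hc1]
      by_cases hcond : 3 ≤ List.countP id [a, b, c, d, dcsFlag e]
      · rw [if_pos (by exact_mod_cast hcond), if_pos hcond]
      · rw [if_neg (by exact_mod_cast hcond), if_neg hcond]
        rw [lemBf rest [a, b, c, d, dcsFlag e] _ rfl rfl]
        simp
    · have hflag : dcsCollapseSet.contains (dcsEvent e) = dcsFlag e := by rw [dcsSet_eq]; rfl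
      have h1 : ¬ (5 < (w ++ [dcsFlag e]).length) := by simp; omega
      have h2 : ¬ ((w ++ [dcsFlag e]).length = 5) := by simp; omega
      rw [dcsLoopB_cons]
      simp only [hflag]
      rw [if_neg h1, if_neg h1, if_neg (fun hcon => h2 hcon.1)]
      have hcnt : (if dcsFlag e then count + 1 else count) = ((w ++ [dcsFlag e]).countP id : Int) := by
        cases hfe : dcsFlag e <;> simp [List.countP_append, hc]
      rw [hcnt, ih (w ++ [dcsFlag e]) _ (by simp; omega) rfl]
      simp

-- ===== VERDICT (by name: the statement is the Claim_ definition above) =====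
theorem detect_collapse_spiral_spec : Claim_equal_detect_collapse_spiral := by
  intro s _ _
  unfold Spec_detect_collapse_spiral detect_collapse_spiral detect_collapse_spiral_alt
  have hA : dcsLoopA s (PySem.List.pyRange 0 ((s.length : Int) - 4) 1) = dcsRef (s.map dcsFlag) := by
    have := lemA s s.length 0 (by omega)
    simpa using this
  have harg : PySem.List.len s - 5 + 1 = (s.length : Int) - 4 := by
    simp [PySem.List.len_eq]; omega
  rw [harg, hA]
  by_cases h5 : s.length < 5
  · rw [if_pos h5, dcsRef, if_neg (by simp; omega)]
  · rw [if_neg h5]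
    simpa using (lemBb s [] 0 (by simp) (by simp)).symm
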